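-- pv_equiv track=rewrite | github.com/Donglehae/algorithm | Programmers/Level 1/84325.py | solution
-- ===== SOURCE A (Python) =====
-- def solution(table, languages, preference):
--   answer = ''
--   table_dict = {}
--   for value in table:
--     job = value.split(' ')
--     table_dict[job[0]] = job[1:]
--   for index, value in table_dict.items():
--     buffer = []
--     for idx, val in enumerate(languages):
--       if val in value:
--         buffer.append(preference[idx]*(5-value.index(val)))
--     table_dict[index] = sum(buffer)
--   table_dict = dict(sorted(table_dict.items()))
--   answer = max(table_dict, key=table_dict.get)
--   return answer
-- ===== SOURCE B (Python) =====
-- def solution(table, languages, preference):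
--     rows = {}
--     for line in table:
--         parts = line.split(' ')
--         rows[parts[0]] = parts[1:]
--     best_name = None
--     best_score = None
--     for name, langs in rows.items():
--         score = 0
--         for idx, lang in enumerate(languages):
--             if lang in langs:
--                 score += preference[idx] * (5 - langs.index(lang))
--         if best_name is None or score > best_score or (score == best_score and name < best_name):
--             best_name = name
--             best_score = score
--     return best_name
-- ===== Notes on version B (the rewrite author's own statement) =====
-- stated objective: simpler
-- what changed: B drops A's score-dict rebuild, the sort of the items and max(..., key=get): after parsing the rows it computes each job's score once and keeps a running (best_name, best_score), taking a candidate on strictly greater score or on equal score with alphabetically smaller name.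
import Mathlib
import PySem

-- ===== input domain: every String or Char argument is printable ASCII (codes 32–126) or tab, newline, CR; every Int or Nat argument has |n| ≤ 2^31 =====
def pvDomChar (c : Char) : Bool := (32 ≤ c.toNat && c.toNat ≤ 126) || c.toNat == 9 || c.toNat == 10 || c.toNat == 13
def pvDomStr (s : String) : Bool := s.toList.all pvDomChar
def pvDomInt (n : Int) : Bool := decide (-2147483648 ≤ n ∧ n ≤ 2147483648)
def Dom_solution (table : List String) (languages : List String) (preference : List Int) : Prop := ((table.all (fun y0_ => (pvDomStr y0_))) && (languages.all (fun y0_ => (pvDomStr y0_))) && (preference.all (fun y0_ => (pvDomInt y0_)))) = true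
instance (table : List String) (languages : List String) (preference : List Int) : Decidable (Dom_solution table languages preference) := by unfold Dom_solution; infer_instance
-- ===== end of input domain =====

-- B replaces A's score-dict + sort + max-by-value pipeline with a single running-best
-- scan (strictly-greater score, or equal score and alphabetically smaller name, wins);
-- objective: simpler (no sort, no second dict).

-- ===== PORT A =====
-- job = value.split(' '); (job[0], job[1:])  (shared parsing step of both Pythons)
def parseRow (line : String) : String × List String :=
  ((((PySem.Str.split? line " ").getD []).headD ""), ((PySem.Str.split? line " ").getD []).tail)

-- A's inner loop: buffer of preference[idx]*(5-value.index(val)) for matched languages, then sum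
def scoreA (languages : List String) (preference : List Int) (value : List String) : Int :=
  ((PySem.List.enumerate languages).foldl
    (fun buffer iv =>
      if iv.2 ∈ value then
        buffer ++ [PySem.List.pyGetD preference iv.1 0 * (5 - (((PySem.List.index? value iv.2).getD 0 : Nat) : Int))]
      else buffer) []).sum

-- first loop of both Pythons: table_dict[job[0]] = job[1:]
def tableDictOf (table : List String) : PySem.Dict String (List String) :=
  table.foldl (fun d line => d.insert (parseRow line).1 (parseRow line).2) PySem.Dict.empty

-- Python mutates table_dict's values from lists to ints in place; a typed port rebuilds
-- the dict with the scored values (same keys, same order)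
def scoredDictOf (table : List String) (languages : List String) (preference : List Int) : PySem.Dict String Int :=
  (tableDictOf table).items.foldl (fun d2 kv => d2.insert kv.1 (scoreA languages preference kv.2)) PySem.Dict.empty

-- table_dict = dict(sorted(table_dict.items()))
def sortedDictOf (table : List String) (languages : List String) (preference : List Int) : PySem.Dict String Int :=
  PySem.Dict.ofList (PySem.List.sorted2 (scoredDictOf table languages preference).items (fun p => p.1) (fun p => p.2))

def solution (table : List String) (languages : List String) (preference : List Int) : String :=
  (PySem.List.max? (sortedDictOf table languages preference).keys
    (fun k => (sortedDictOf table languages preference).getD k 0)).getD ""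

-- ===== PORT B =====
-- B's inner loop: running score accumulator (same matched-language terms)
def scoreB (languages : List String) (preference : List Int) (langs : List String) : Int :=
  (PySem.List.enumerate languages).foldl
    (fun score iv =>
      if iv.2 ∈ langs then
        score + PySem.List.pyGetD preference iv.1 0 * (5 - (((PySem.List.index? langs iv.2).getD 0 : Nat) : Int))
      else score) 0

-- B's running best: take the candidate if its score is strictly greater, or equal with a smaller name
def bestUpd (best : Option (String × Int)) (cand : String × Int) : Option (String × Int) :=
  match best with
  | none => some cand
  | some b => if cand.2 > b.2 ∨ (cand.2 = b.2 ∧ cand.1 < b.1) then some cand else some b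

-- B's single pass over the parsed rows, carrying the running best
def bestOf (table : List String) (languages : List String) (preference : List Int) : Option (String × Int) :=
  (tableDictOf table).items.foldl (fun b kv => bestUpd b (kv.1, scoreB languages preference kv.2)) none

def solution_alt (table : List String) (languages : List String) (preference : List Int) : String :=
  match bestOf table languages preference with
  | some b => b.1
  | none => ""  -- Python B returns None here; excluded by Pre_ (empty table)

-- ===== PRECONDITION & SPEC =====
-- Pre_ excludes exactly the inputs where the Python A raises: the empty table (max() of an
-- empty dict, ValueError) and inputs where some language with index ≥ len(preference) occurs
-- in the language list of a surviving row (last row with its job code), where preference[idx]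
-- raises IndexError (B raises there too).
def Pre_solution (table : List String) (languages : List String) (preference : List Int) : Prop :=
  table ≠ [] ∧
  ∀ i : Fin languages.length, preference.length ≤ (i : Nat) →
    ∀ j : Fin table.length,
      (∀ j' : Fin table.length, (j : Nat) < (j' : Nat) →
        (((PySem.Str.split? table[j'] " ").getD []).headD "") ≠ (((PySem.Str.split? table[j] " ").getD []).headD "")) →
      languages[i] ∉ ((PySem.Str.split? table[j] " ").getD []).tail
instance (table : List String) (languages : List String) (preference : List Int) : Decidable (Pre_solution table languages preference) := by unfold Pre_solution; infer_instance

def pvWitness_solution : List String × List String × List Int :=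
  (["abc java python", "def c python"], ["python", "java"], [4, 3])

def Spec_solution (table : List String) (languages : List String) (preference : List Int) (out : String) : Prop := out = solution_alt table languages preference
instance (table : List String) (languages : List String) (preference : List Int) (out : String) : Decidable (Spec_solution table languages preference out) := by unfold Spec_solution; infer_instance

-- ===== CLAIM (what is proved, stated in full; the proofs are below) =====
def Claim_equal_solution : Prop := ∀ (table : List String) (languages : List String) (preference : List Int), Dom_solution table languages preference → Pre_solution table languages preference → Spec_solution table languages preference (solution table languages preference)

-- ===== LEMMAS AND PROOFS =====

-- A's buffer-then-sum equals B's running sum (same matched terms, same order)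
theorem scoreA_eq_scoreB (languages : List String) (preference : List Int) (v : List String) :
    scoreA languages preference v = scoreB languages preference v := by
  unfold scoreA scoreB
  rw [PySem.List.foldl_append_ite (p := fun iv : Int × String => iv.2 ∈ v)
      (f := fun iv : Int × String => PySem.List.pyGetD preference iv.1 0 * (5 - (((PySem.List.index? v iv.2).getD 0 : Nat) : Int)))]
  rw [PySem.List.foldl_ite_eq_foldl_filter (p := fun iv : Int × String => iv.2 ∈ v)
      (f := fun score (iv : Int × String) => score + PySem.List.pyGetD preference iv.1 0 * (5 - (((PySem.List.index? v iv.2).getD 0 : Nat) : Int)))]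
  rw [PySem.List.foldl_add]
  simp

-- max? over a mapped list
theorem max?_map {α γ κ : Type} [LT κ] [DecidableLT κ] (f : α → γ) (key : γ → κ) (l : List α) :
    PySem.List.max? (l.map f) key = (PySem.List.max? l (fun x => key (f x))).map f := by
  unfold PySem.List.max?
  rw [List.foldl_map]
  suffices h : ∀ (a : Option α),
      l.foldl (fun acc x => match acc with
        | none => some (f x)
        | some m => if key m < key (f x) then some (f x) else some m) (a.map f)
      = (l.foldl (fun acc x => match acc with
        | none => some x
        | some m => if key (f m) < key (f x) then some x else some m) a).map f by
    exact h none
  induction l with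
  | nil => intro a; rfl
  | cons x t ih =>
    intro a
    cases a with
    | none => simpa using ih (some x)
    | some m =>
      simp only [List.foldl_cons, Option.map_some]
      by_cases hk : key (f m) < key (f x)
      · simpa [hk] using ih (some x)
      · simpa [hk] using ih (some m)

-- max? only depends on the key's values on the list (and on the accumulator)
theorem max?_fold_congr {α κ : Type} [LT κ] [DecidableLT κ] (k1 k2 : α → κ) :
    ∀ (l : List α) (a : Option α), (∀ x ∈ l, k1 x = k2 x) → (∀ m, a = some m → k1 m = k2 m) →
      l.foldl (fun acc x => match acc with
        | none => some x
        | some m => if k1 m < k1 x then some x else some m) a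
      = l.foldl (fun acc x => match acc with
        | none => some x
        | some m => if k2 m < k2 x then some x else some m) a := by
  intro l
  induction l with
  | nil => intro a _ _; rfl
  | cons x t ih =>
    intro a hl ha
    have hx : k1 x = k2 x := hl x (by simp)
    have ht : ∀ y ∈ t, k1 y = k2 y := fun y hy => hl y (by simp [hy])
    simp only [List.foldl_cons]
    cases a with
    | none =>
      exact ih (some x) ht (by rintro m hm; cases hm; exact hx)
    | some m =>
      have hm : k1 m = k2 m := ha m rfl
      dsimp only
      rw [hx, hm]
      by_cases hk : k2 m < k2 x
      · simp only [hk, if_true]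
        exact ih (some x) ht (by rintro m' hm'; cases hm'; exact hx)
      · simp only [hk, if_false]
        exact ih (some m) ht (by rintro m' hm'; cases hm'; exact hm)

theorem max?_congr {α κ : Type} [LT κ] [DecidableLT κ] (l : List α) (k1 k2 : α → κ)
    (h : ∀ x ∈ l, k1 x = k2 x) : PySem.List.max? l k1 = PySem.List.max? l k2 := by
  unfold PySem.List.max?
  exact max?_fold_congr k1 k2 l none h (by simp)

theorem bestUpd_some (b cand : String × Int) :
    bestUpd (some b) cand = if cand.2 > b.2 ∨ (cand.2 = b.2 ∧ cand.1 < b.1) then some cand else some b := rfl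

-- on a list with strictly increasing names the name tie-break never fires,
-- so first-arg-max-by-score equals B's best fold
theorem foldl_best_agree_aux :
    ∀ (l : List (String × Int)) (m : String × Int), (∀ x ∈ l, m.1 < x.1) →
      l.Pairwise (fun a b => a.1 < b.1) →
      l.foldl (fun acc x => match acc with
        | none => some x
        | some q => if q.2 < x.2 then some x else some q) (some m) = l.foldl bestUpd (some m) := by
  intro l
  induction l with
  | nil => intro m _ _; rfl
  | cons x t ih =>
    intro m hm hpw
    have hmx : m.1 < x.1 := hm x (by simp)
    have hxt : ∀ y ∈ t, x.1 < y.1 := fun y hy => (List.pairwise_cons.mp hpw).1 y hy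
    have hpt : t.Pairwise (fun a b => a.1 < b.1) := (List.pairwise_cons.mp hpw).2
    simp only [List.foldl_cons, bestUpd_some]
    have hcond : (x.2 > m.2 ∨ (x.2 = m.2 ∧ x.1 < m.1)) ↔ m.2 < x.2 := by
      constructor
      · rintro (h | ⟨_, h⟩)
        · exact h
        · exact absurd h (lt_asymm hmx)
      · exact fun h => Or.inl h
    by_cases hk : m.2 < x.2
    · rw [if_pos (hcond.mpr hk), if_pos hk]
      exact ih x hxt hpt
    · rw [if_neg (fun h => hk (hcond.mp h)), if_neg hk]
      exact ih m (fun y hy => lt_trans hmx (hxt y hy)) hpt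

theorem foldl_best_agree (l : List (String × Int)) (hpw : l.Pairwise (fun a b => a.1 < b.1)) :
    l.foldl (fun acc x => match acc with
      | none => some x
      | some m => if m.2 < x.2 then some x else some m) none = l.foldl bestUpd none := by
  cases l with
  | nil => rfl
  | cons x t =>
    simp only [List.foldl_cons]
    exact foldl_best_agree_aux t x ((List.pairwise_cons.mp hpw).1) ((List.pairwise_cons.mp hpw).2)

-- bestUpd is the max of a linear order on (score, reversed name), hence right-commutative
theorem bestUpd_rightComm (b : Option (String × Int)) (a a' : String × Int) :
    bestUpd (bestUpd b a) a' = bestUpd (bestUpd b a') a := by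
  have key : ∀ p q : String × Int, ¬ (p.2 > q.2 ∨ (p.2 = q.2 ∧ p.1 < q.1)) →
      ¬ (q.2 > p.2 ∨ (q.2 = p.2 ∧ q.1 < p.1)) → p = q := by
    intro p q hp hq
    push_neg at hp hq
    have h2 : p.2 = q.2 := le_antisymm hp.1 hq.1
    have h1 : p.1 = q.1 := le_antisymm (not_lt.mp (hq.2 h2.symm)) (not_lt.mp (hp.2 h2))
    exact Prod.ext h1 h2
  have battle : ∀ u v : String × Int,
      (if v.2 > u.2 ∨ (v.2 = u.2 ∧ v.1 < u.1) then some v else some u)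
        = (if u.2 > v.2 ∨ (u.2 = v.2 ∧ u.1 < v.1) then some u else some v) := by
    intro u v
    by_cases h1 : v.2 > u.2 ∨ (v.2 = u.2 ∧ v.1 < u.1) <;>
      by_cases h2 : u.2 > v.2 ∨ (u.2 = v.2 ∧ u.1 < v.1)
    · rcases h1 with h1 | ⟨e1, l1⟩ <;> rcases h2 with h2 | ⟨e2, l2⟩
      · exact absurd h2 (lt_asymm h1)
      · omega
      · omega
      · exact absurd l2 (lt_asymm l1)
    · rw [if_pos h1, if_neg h2]
    · rw [if_neg h1, if_pos h2]
    · rw [if_neg h1, if_neg h2, key v u h1 h2]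
  cases b with
  | none =>
    simp only [bestUpd]
    exact battle a a'
  | some q =>
    simp only [bestUpd_some]
    by_cases ha : a.2 > q.2 ∨ (a.2 = q.2 ∧ a.1 < q.1) <;>
      by_cases ha' : a'.2 > q.2 ∨ (a'.2 = q.2 ∧ a'.1 < q.1)
    · rw [if_pos ha, if_pos ha', bestUpd_some, bestUpd_some]
      exact battle a a'
    · rw [if_pos ha, if_neg ha', bestUpd_some, bestUpd_some]
      have h1 : ¬ (a'.2 > a.2 ∨ (a'.2 = a.2 ∧ a'.1 < a.1)) := by
        push_neg at ha' ⊢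
        rcases ha with h | ⟨e, l⟩
        · exact ⟨by omega, fun e2 => by omega⟩
        · refine ⟨by omega, fun e2 => ?_⟩
          have he : a'.2 = q.2 := by omega
          exact fun hlt => (ha'.2 he).elim (lt_trans hlt l)
      rw [if_neg h1, if_pos ha]
    · rw [if_neg ha, if_pos ha', bestUpd_some, bestUpd_some]
      have h1 : ¬ (a.2 > a'.2 ∨ (a.2 = a'.2 ∧ a.1 < a'.1)) := by
        push_neg at ha ⊢
        rcases ha' with h | ⟨e, l⟩
        · exact ⟨by omega, fun e2 => by omega⟩
        · refine ⟨by omega, fun e2 => ?_⟩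
          have he : a.2 = q.2 := by omega
          exact fun hlt => (ha.2 he).elim (lt_trans hlt l)
      rw [if_pos ha', if_neg h1]
    · rw [if_neg ha, if_neg ha', bestUpd_some, bestUpd_some, if_neg ha', if_neg ha]

theorem insertBy_congr {α : Type} (before before' : α → α → Bool) (x : α) :
    ∀ (acc : List α), (∀ a ∈ acc, before x a = before' x a) →
      PySem.List.insertBy before x acc = PySem.List.insertBy before' x acc := by
  intro acc
  induction acc with
  | nil => intro _; rfl
  | cons y ys ih =>
    intro h
    have hy : before x y = before' x y := h y (by simp)
    unfold PySem.List.insertBy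
    rw [hy]
    by_cases hb : before' x y = true
    · simp [hb]
    · have := ih (fun a ha => h a (by simp [ha]))
      simp [hb, this]

theorem sortfold_congr_aux (lexB fstB : (String × Int) → (String × Int) → Bool)
    (hagree : ∀ p q : String × Int, p.1 ≠ q.1 → lexB p q = fstB p q) :
    ∀ (l : List (String × Int)) (acc : List (String × Int)),
      (∀ x ∈ l, ∀ a ∈ acc, x.1 ≠ a.1) → (l.map (fun p => p.1)).Nodup →
      l.foldl (fun acc x => PySem.List.insertBy lexB x acc) acc
        = l.foldl (fun acc x => PySem.List.insertBy fstB x acc) acc := by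
  intro l
  induction l with
  | nil => intro acc _ _; rfl
  | cons x t ih =>
    intro acc hsep hnd
    simp only [List.map_cons, List.nodup_cons] at hnd
    have hins : PySem.List.insertBy lexB x acc = PySem.List.insertBy fstB x acc :=
      insertBy_congr _ _ _ acc (fun a ha => hagree x a (hsep x (by simp) a ha))
    simp only [List.foldl_cons, hins]
    apply ih
    · intro y hy a ha
      rcases (PySem.List.mem_insertBy fstB x a acc).mp ha with rfl | ha'
      · intro he
        exact hnd.1 (by rw [← he]; exact List.mem_map_of_mem hy)
      · exact hsep y (by simp [hy]) a ha'
    · exact hnd.2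

-- sorting pairs by the tuple equals sorting by the name when names are distinct
theorem sorted2_eq_sorted_fst (l : List (String × Int)) (h : (l.map (fun p => p.1)).Nodup) :
    PySem.List.sorted2 l (fun p => p.1) (fun p => p.2) = PySem.List.sorted l (fun p => p.1) := by
  unfold PySem.List.sorted2 PySem.List.sorted
  simp only [if_neg (by decide : ¬ (false = true))]
  apply sortfold_congr_aux
  · intro p q hne
    by_cases h1 : p.1 < q.1
    · simp [h1]
    · have h2 : q.1 < p.1 := lt_of_le_of_ne (not_lt.mp h1) (fun he => hne he.symm)
      simp [h1, h2]
  · intro x _ a ha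
    exact absurd ha (List.not_mem_nil)
  · exact h

-- ===== VERDICT (by name: the statement is the Claim_ definition above) =====
theorem solution_spec : Claim_equal_solution := by
  intro table languages preference _hdom _hpre
  unfold Spec_solution solution solution_alt
  have hnd' : ((tableDictOf table).items.map (fun kv => kv.1)).Nodup := by
    unfold tableDictOf
    exact PySem.Dict.nodup_keys_foldl_insert_key table (fun line => (parseRow line).1)
      (fun _ line => (parseRow line).2) PySem.Dict.empty PySem.Dict.nodup_keys_empty
  set scored : List (String × Int) :=
    (tableDictOf table).items.map (fun kv => (kv.1, scoreA languages preference kv.2)) with hscored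
  have hmap : scored.map (fun p => p.1) = (tableDictOf table).items.map (fun kv => kv.1) := by
    rw [hscored, List.map_map]; rfl
  have hsnd : (scored.map (fun p => p.1)).Nodup := by rw [hmap]; exact hnd'
  have h1 : (scoredDictOf table languages preference).items = scored := by
    unfold scoredDictOf
    rw [hscored]
    simpa using PySem.Dict.items_foldl_insert_fresh (tableDictOf table).items (fun kv => kv.1)
      (fun kv => scoreA languages preference kv.2) PySem.Dict.empty
      (fun a _ => PySem.Dict.contains_empty _) hnd'
  set qs : List (String × Int) :=
    PySem.List.sorted2 scored (fun p => p.1) (fun p => p.2) with hqs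
  have hperm : qs.Perm scored := PySem.List.sorted2_perm scored _ _ false
  have hqnodup : (qs.map (fun p => p.1)).Nodup := ((hperm.map _).nodup_iff).mpr hsnd
  have hpw : qs.Pairwise (fun a b => a.1 < b.1) := by
    have hne : qs.Pairwise (fun a b => a.1 ≠ b.1) := (List.pairwise_map).mp hqnodup
    have hle : qs.Pairwise (fun a b => a.1 ≤ b.1) := by
      rw [hqs, sorted2_eq_sorted_fst scored hsnd]
      exact PySem.List.sorted_pairwise scored (fun p => p.1)
    exact (hle.and hne).imp (fun h => lt_of_le_of_ne h.1 h.2)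
  have hsorted : sortedDictOf table languages preference = PySem.Dict.ofList qs := by
    unfold sortedDictOf
    rw [h1, hqs]
  have hd2 : (PySem.Dict.ofList qs).items = qs := by
    show (qs.foldl (fun acc p => acc.insert p.1 p.2) PySem.Dict.empty).items = qs
    simpa using PySem.Dict.items_foldl_insert_fresh qs (fun p => p.1) (fun p => p.2)
      PySem.Dict.empty (fun a _ => PySem.Dict.contains_empty _) hqnodup
  have hd2keys : (PySem.Dict.ofList qs).keys = qs.map (fun p => p.1) := by
    show (PySem.Dict.ofList qs).items.map (fun p => p.1) = _
    rw [hd2]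
  have hd2nodup : (PySem.Dict.ofList qs).keys.Nodup := by rw [hd2keys]; exact hqnodup
  have hlookup : ∀ p ∈ qs, (PySem.Dict.ofList qs).getD p.1 0 = p.2 := by
    intro p hp
    exact PySem.Dict.getD_of_mem_items _ (by rw [hd2]; simpa using hp) hd2nodup 0
  rw [hsorted, hd2keys, max?_map (fun p : String × Int => p.1) _ qs,
    max?_congr qs _ (fun p => p.2) hlookup]
  have hA : PySem.List.max? qs (fun p => p.2) = scored.foldl bestUpd none := by
    unfold PySem.List.max?
    refine Eq.trans (PySem.List.foldl_congr_mem qs _ (fun (acc : Option (String × Int)) (x : String × Int) =>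
      match acc with
      | none => some x
      | some m => if m.2 < x.2 then some x else some m) none (fun acc x _ => ?_)) ?_
    · cases acc <;> rfl
    rw [foldl_best_agree qs hpw]
    haveI : RightCommutative bestUpd := ⟨bestUpd_rightComm⟩
    exact hperm.foldl_eq none
  rw [hA]
  have hB : bestOf table languages preference = scored.foldl bestUpd none := by
    unfold bestOf
    simp only [← scoreA_eq_scoreB]
    rw [hscored, List.foldl_map]
  rw [hB]
  cases scored.foldl bestUpd none with
  | none => rfl
  | some b => rfl
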